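-- pv_equiv track=rewrite | github.com/CD-01-prog/CS-14xx | random_assignments/dnaSequencing.py | findBestCandidate
-- ===== SOURCE A (Python) =====
-- def strandsAreNotEmpty(strand1, strand2):
--     if len(strand1) > 0 and len(strand2) > 0:
--         return True
--     else:
--         return False
--
-- def strandsAreEqualLengths(strand1, strand2):
--     if len(strand1) == len(strand2):
--         return True
--     else:
--         return False
--
-- def candidateOverlapsTarget(target, candidate, overlap):
--     if target[len(target) - overlap:] == candidate[0:overlap]:
--         return True
--     else:
--         return False
--
-- def findLargestOverlap(target, candidate):
--     count = 0
--     overlap = 1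
--     if strandsAreNotEmpty(target, candidate) == False or strandsAreEqualLengths(target, candidate) == False:
--         return -1
--     else:
--         while len(target) > overlap:
--             if candidateOverlapsTarget(target, candidate, overlap) == True:
--                 count = overlap
--                 overlap += 1
--             else:
--               overlap += 1
--         return count
--
-- def findBestCandidate(target, candidates):
--     best = ()
--     word = ""
--     number = 0
--     for line in candidates:
--         if findLargestOverlap(target, line) > number:
--             word = line
--             number = findLargestOverlap(target, line)
--     best = (word, number)
--     return best
-- ===== SOURCE B (Python) =====
-- def findBestCandidate(target, candidates):
--     n = len(target)
--
--     def overlap(c):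
--         # KMP: longest proper suffix of target that is a prefix of c,
--         # for equal-length non-empty strands; -1 otherwise.
--         if n == 0 or len(c) != n:
--             return -1
--         # prefix function of c: pi[i] = longest proper border of c[:i+1]
--         pi = [0]
--         k = 0
--         for i in range(1, n):
--             while k > 0 and c[i] != c[k]:
--                 k = pi[k - 1]
--             if c[i] == c[k]:
--                 k += 1
--             pi.append(k)
--         # run the KMP automaton over target; final state = longest prefix of c
--         # that is a suffix of target
--         q = 0
--         for ch in target:
--             while q > 0 and c[q] != ch:
--                 q = pi[q - 1]
--             if c[q] == ch:
--                 q += 1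
--         if q == n:          # full match (c == target): take the proper border
--             q = pi[n - 1]
--         return q
--
--     word, number = "", 0
--     for line in candidates:
--         v = overlap(line)
--         if v > number:
--             word, number = line, v
--     return (word, number)
-- ===== Notes on version B (the rewrite author's own statement) =====
-- stated objective: faster
-- what changed: A compares target-suffix/candidate-prefix slices for every overlap length (O(n^2) per candidate, computed twice); B computes each candidate's overlap with the KMP prefix-function automaton run once over the target (O(n) per candidate).
import Mathlib
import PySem

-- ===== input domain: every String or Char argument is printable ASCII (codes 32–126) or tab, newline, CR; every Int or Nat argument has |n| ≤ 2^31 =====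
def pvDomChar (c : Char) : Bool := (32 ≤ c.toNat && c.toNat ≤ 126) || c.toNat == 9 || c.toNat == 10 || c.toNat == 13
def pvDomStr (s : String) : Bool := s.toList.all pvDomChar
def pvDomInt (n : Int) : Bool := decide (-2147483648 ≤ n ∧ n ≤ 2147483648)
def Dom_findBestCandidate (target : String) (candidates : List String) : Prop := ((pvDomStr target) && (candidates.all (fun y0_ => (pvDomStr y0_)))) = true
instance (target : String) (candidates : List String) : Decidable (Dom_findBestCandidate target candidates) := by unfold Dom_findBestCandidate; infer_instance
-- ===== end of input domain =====

-- B replaces A's per-length suffix/prefix slice comparisons by the KMP prefix-function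
-- automaton run once over the target per candidate (objective: faster).

-- ===== PORT A =====
def strandsAreNotEmpty (strand1 strand2 : String) : Bool :=
  if PySem.Str.len strand1 > 0 ∧ PySem.Str.len strand2 > 0 then true else false

def strandsAreEqualLengths (strand1 strand2 : String) : Bool :=
  if PySem.Str.len strand1 = PySem.Str.len strand2 then true else false

-- Python compares string slices for equality; comparing the code-point lists is exact.
def candidateOverlapsTarget (target candidate : String) (overlap : Int) : Bool :=
  if PySem.List.slice target.toList (some (PySem.Str.len target - overlap)) none
     = PySem.List.slice candidate.toList (some 0) (some overlap) then true else false

def findLargestOverlapLoop (target candidate : String) (count overlap : Int) : Int :=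
  if h : PySem.Str.len target > overlap then
    if candidateOverlapsTarget target candidate overlap = true then
      findLargestOverlapLoop target candidate overlap (overlap + 1)
    else
      findLargestOverlapLoop target candidate count (overlap + 1)
  else count
termination_by (PySem.Str.len target - overlap).toNat
decreasing_by all_goals omega

def findLargestOverlap (target candidate : String) : Int :=
  if strandsAreNotEmpty target candidate = false ∨ strandsAreEqualLengths target candidate = false then
    -1
  else
    findLargestOverlapLoop target candidate 0 1

def findBestCandidate (target : String) (candidates : List String) : String × Int :=
  candidates.foldl
    (fun (st : String × Int) line =>
      if findLargestOverlap target line > st.2 then (line, findLargestOverlap target line) else st)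
    ("", 0)

-- ===== PORT B =====
-- 'while k > 0 and c[idx] != x: k = pi[k - 1]'; fuel = starting k is enough because
-- each pi entry is a proper border length, strictly smaller than its index + 1.
-- All indices are in range in every use, so List.getD is exact for c[i] / pi[j].
def altFall (cc : List Char) (pi : List Nat) (x : Char) : Nat → Nat → Nat
  | 0, k => k
  | f + 1, k => if k ≠ 0 ∧ cc.getD k ' ' ≠ x then altFall cc pi x f (pi.getD (k - 1) 0) else k

-- the shared while + 'if c[k] == x: k += 1' step of both loops in Source B
def altStep (cc : List Char) (pi : List Nat) (k : Nat) (x : Char) : Nat :=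
  let k1 := altFall cc pi x k k
  if cc.getD k1 ' ' = x then k1 + 1 else k1

-- 'for i in range(1, n): ... pi.append(k)'
def altPiLoop (cc : List Char) (n i : Nat) (pi : List Nat) (k : Nat) : List Nat :=
  if i < n then
    let k2 := altStep cc pi k (cc.getD i ' ')
    altPiLoop cc n (i + 1) (pi ++ [k2]) k2
  else pi
termination_by n - i

def altOverlap (target c : String) : Int :=
  let tc := target.toList
  let n := tc.length
  if n = 0 ∨ c.toList.length ≠ n then -1
  else
    let cc := c.toList
    let pi := altPiLoop cc n 1 [0] 0
    let q := tc.foldl (fun q ch => altStep cc pi q ch) 0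
    ((if q = n then pi.getD (n - 1) 0 else q : Nat) : Int)

def findBestCandidate_alt (target : String) (candidates : List String) : String × Int :=
  candidates.foldl
    (fun (st : String × Int) line =>
      let v := altOverlap target line
      if v > st.2 then (line, v) else st)
    ("", 0)

-- ===== PRECONDITION & SPEC =====
def Spec_findBestCandidate (target : String) (candidates : List String) (out : String × Int) : Prop := out = findBestCandidate_alt target candidates
instance (target : String) (candidates : List String) (out : String × Int) : Decidable (Spec_findBestCandidate target candidates out) := by unfold Spec_findBestCandidate; infer_instance

-- ===== CLAIM (what is proved, stated in full; the proofs are below) =====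
def Claim_equal_findBestCandidate : Prop := ∀ (target : String) (candidates : List String), Dom_findBestCandidate target candidates → Spec_findBestCandidate target candidates (findBestCandidate target candidates)

-- ===== LEMMAS AND PROOFS =====

-- A's ascending keep-last-match loop, reshaped as a descending first-match scan
def dscan (target c : String) (lo : Nat) (d : Int) : Nat → Int
  | 0 => d
  | h + 1 =>
    if h + 1 < lo then d
    else if target.toList.drop (target.toList.length - (h + 1)) = c.toList.take (h + 1) then ((h + 1 : Nat) : Int) else dscan target c lo d h

-- longest proper border of cc.take q (border = prefix of cc that is also its suffix)
def mpb (cc : List Char) (q : Nat) : Nat :=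
  Nat.findGreatest (fun k => cc.take k <:+ cc.take q) (q - 1)

-- semantic model of altFall: descend the border chain until the next char matches
def chainFind (cc : List Char) (x : Char) : Nat → Nat
  | 0 => 0
  | k + 1 => if cc.getD (k + 1) ' ' = x then k + 1 else chainFind cc x (mpb cc (k + 1))
termination_by k => k
decreasing_by
  exact Nat.lt_succ_of_le (Nat.findGreatest_le k)

-- the intended value of one automaton step from state k on character x
def NX (cc : List Char) (k : Nat) (x : Char) : Nat :=
  Nat.findGreatest (fun m => 0 < m ∧ cc.take (m - 1) <:+ cc.take k ∧ cc.getD (m - 1) ' ' = x) (k + 1)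

-- pi holds the proper-border lengths mpb cc 1 .. mpb cc b at indices 0 .. b-1
def Good (cc : List Char) (pi : List Nat) (b : Nat) : Prop :=
  ∀ j, 1 ≤ j → j ≤ b → pi.getD (j - 1) 0 = mpb cc j

-- automaton state after reading p: longest prefix of cc that is a suffix of p
def ovv (cc p : List Char) : Nat :=
  Nat.findGreatest (fun k => cc.take k <:+ p) p.length

lemma dscan_of_lt (target c : String) (lo : Nat) (d : Int) (hi : Nat) (h : hi < lo) :
    dscan target c lo d hi = d := by
  cases hi with
  | zero => rfl
  | succ n => simp [dscan, h]

lemma dscan_peel (target c : String) (lo : Nat) (d : Int) (hi : Nat)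
    (hlo : 1 ≤ lo) (h : lo ≤ hi) :
    dscan target c lo d hi =
      dscan target c (lo + 1) (if target.toList.drop (target.toList.length - lo) = c.toList.take lo then (lo : Int) else d) hi := by
  induction hi with
  | zero => omega
  | succ n ih =>
    by_cases hlt : lo < n + 1
    · have h1 : ¬ (n + 1 < lo) := by omega
      have h2 : ¬ (n + 1 < lo + 1) := by omega
      simp only [dscan, h1, h2, if_false]
      by_cases hm : target.toList.drop (target.toList.length - (n + 1)) = c.toList.take (n + 1)
      · rw [if_pos hm, if_pos hm]
      · rw [if_neg hm, if_neg hm, ih (by omega)]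
    · have heq : n + 1 = lo := by omega
      subst heq
      simp only [dscan]
      have h1 : ¬ (n + 1 < n + 1) := by omega
      have h2 : n + 1 < n + 1 + 1 := by omega
      simp only [h1, if_false, h2, if_true]
      by_cases hm : target.toList.drop (target.toList.length - (n + 1)) = c.toList.take (n + 1)
      · rw [if_pos hm, if_pos hm]
      · simp only [hm, if_false]
        exact dscan_of_lt target c (n + 1) d n (by omega)

lemma candidateOverlaps_eq_mtch (target c : String) (k : Nat) (hk : k ≤ target.toList.length) :
    candidateOverlapsTarget target c ((k : Nat) : Int) = decide (target.toList.drop (target.toList.length - k) = c.toList.take k) := by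
  unfold candidateOverlapsTarget
  have hcast : PySem.Str.len target - ((k : Nat) : Int) = ((target.toList.length - k : Nat) : Int) := by
    rw [PySem.Str.len_eq]; omega
  rw [hcast, PySem.List.slice_from_natCast, PySem.List.slice_zero_start,
      PySem.List.slice_to_natCast]
  simp

lemma flowLoop_eq_dscan (target c : String) (o : Nat) (d : Int)
    (h1 : 1 ≤ o) (h2 : o ≤ target.toList.length) :
    findLargestOverlapLoop target c d ((o : Nat) : Int) =
      dscan target c o d (target.toList.length - 1) := by
  generalize hfuel : target.toList.length - o = fuel
  induction fuel generalizing o d with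
  | zero =>
    have ho : o = target.toList.length := by omega
    rw [findLargestOverlapLoop]
    have hg : ¬ (PySem.Str.len target > ((o : Nat) : Int)) := by
      rw [PySem.Str.len_eq]; omega
    rw [dif_neg hg, dscan_of_lt target c o d (target.toList.length - 1) (by omega)]
  | succ n ih =>
    have ho : o < target.toList.length := by omega
    rw [findLargestOverlapLoop]
    have hg : PySem.Str.len target > ((o : Nat) : Int) := by
      rw [PySem.Str.len_eq]; exact_mod_cast ho
    rw [dif_pos hg]
    have hcast : ((o : Nat) : Int) + 1 = (((o + 1 : Nat)) : Int) := by push_cast; ring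
    have hco := candidateOverlaps_eq_mtch target c o (by omega)
    rw [dscan_peel target c o d (target.toList.length - 1) h1 (by omega)]
    by_cases hm : target.toList.drop (target.toList.length - o) = c.toList.take o
    · have hb : candidateOverlapsTarget target c ((o : Nat) : Int) = true := by
        rw [hco]; exact decide_eq_true hm
      rw [if_pos hb, hcast, ih (o + 1) ((o : Nat) : Int) (by omega) (by omega) (by omega)]
      rw [if_pos hm]
    · have hb : ¬ (candidateOverlapsTarget target c ((o : Nat) : Int) = true) := by
        rw [hco]; simp only [decide_eq_true_eq]; exact hm
      rw [if_neg hb, hcast, ih (o + 1) d (by omega) (by omega) (by omega)]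
      rw [if_neg hm]

lemma dscan_eq_fg (target c : String) (hi : Nat) :
    dscan target c 1 0 hi = ((Nat.findGreatest (fun k => target.toList.drop (target.toList.length - k) = c.toList.take k) hi : Nat) : Int) := by
  induction hi with
  | zero => rfl
  | succ n ih =>
    rw [Nat.findGreatest_succ]
    simp only [dscan, if_false, show ¬ (n + 1 < 1) by omega]
    by_cases hm : target.toList.drop (target.toList.length - (n + 1)) = c.toList.take (n + 1)
    · rw [if_pos hm, if_pos hm]
    · rw [if_neg hm, if_neg hm, ih]

-- ---- border-theory toolkit ----

lemma fg_congr {P Q : Nat → Prop} [DecidablePred P] [DecidablePred Q] {b b' : Nat}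
    (hb : b' ≤ b)
    (h1 : ∀ m, 0 < m → m ≤ b → P m → (m ≤ b' ∧ Q m))
    (h2 : ∀ m, 0 < m → m ≤ b' → Q m → P m) :
    Nat.findGreatest P b = Nat.findGreatest Q b' := by
  obtain ⟨hB1, hB2, hB3⟩ :=
    (Nat.findGreatest_eq_iff (m := Nat.findGreatest Q b') (k := b')).mp rfl
  rw [Nat.findGreatest_eq_iff]
  refine ⟨le_trans hB1 hb, ?_, ?_⟩
  · intro hne; exact h2 _ (Nat.pos_of_ne_zero hne) hB1 (hB2 hne)
  · intro k hk hkb hPk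
    obtain ⟨hk1, hk2⟩ := h1 k (by omega) hkb hPk
    have := Nat.le_findGreatest hk1 hk2
    omega

lemma take_len {cc : List Char} {k : Nat} (h : k ≤ cc.length) : (cc.take k).length = k := by
  simp [List.length_take, Nat.min_eq_left h]

lemma sfx_le {cc : List Char} {j q : Nat} (hj : j ≤ cc.length) (h : cc.take j <:+ cc.take q) :
    j ≤ q := by
  have := h.length_le
  rw [take_len hj] at this
  have h2 : (cc.take q).length ≤ q := List.length_take_le q cc
  omega

lemma mpb_suffix (cc : List Char) (q : Nat) : cc.take (mpb cc q) <:+ cc.take q := by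
  unfold mpb
  exact Nat.findGreatest_spec (P := fun k => cc.take k <:+ cc.take q) (Nat.zero_le _)
    (by show ([] : List Char) <:+ _; exact List.nil_suffix)

lemma mpb_le (cc : List Char) (q : Nat) : mpb cc q ≤ q - 1 := Nat.findGreatest_le _

lemma ovv_suffix (cc p : List Char) : cc.take (ovv cc p) <:+ p := by
  unfold ovv
  exact Nat.findGreatest_spec (P := fun k => cc.take k <:+ p) (Nat.zero_le _)
    (by show ([] : List Char) <:+ _; exact List.nil_suffix)

lemma ovv_le (cc p : List Char) : ovv cc p ≤ p.length := Nat.findGreatest_le _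

lemma chain_iff {cc : List Char} {q j : Nat} (hq : q ≤ cc.length) (hq0 : 0 < q) (hj : j < q) :
    (cc.take j <:+ cc.take q ↔ cc.take j <:+ cc.take (mpb cc q)) := by
  constructor
  · intro h
    have hjq : j ≤ mpb cc q := by
      unfold mpb; exact Nat.le_findGreatest (by omega) h
    refine List.suffix_of_suffix_length_le h (mpb_suffix cc q) ?_
    rw [take_len (by omega : j ≤ cc.length),
        take_len (by have := mpb_le cc q; omega : mpb cc q ≤ cc.length)]
    exact hjq
  · intro h; exact h.trans (mpb_suffix cc q)

lemma sfx_append_singleton {u p : List Char} {x a : Char} :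
    u ++ [x] <:+ p ++ [a] ↔ x = a ∧ u <:+ p := by
  rw [← List.reverse_prefix, ← List.reverse_prefix (l₁ := u)]
  simp only [List.reverse_append, List.reverse_singleton, List.singleton_append]
  rw [List.cons_prefix_cons]

-- altFall follows the border chain given correct pi entries
lemma altFall_eq_chainFind (cc : List Char) (pi : List Nat) (x : Char) :
    ∀ k f, k ≤ f → Good cc pi k → altFall cc pi x f k = chainFind cc x k := by
  intro k
  induction k using Nat.strong_induction_on with
  | _ k ih =>
    intro f hf hg
    cases k with
    | zero =>
      cases f <;> simp [altFall, chainFind]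
    | succ k' =>
      cases f with
      | zero => omega
      | succ f' =>
        rw [altFall, chainFind]
        by_cases hx : cc.getD (k' + 1) ' ' = x
        · rw [if_neg (fun h => h.2 hx), if_pos hx]
        · have hpi : pi.getD k' 0 = mpb cc (k' + 1) := by
            simpa using hg (k' + 1) (by omega) le_rfl
          rw [if_pos ⟨Nat.succ_ne_zero _, hx⟩, if_neg hx]
          simp only [Nat.add_sub_cancel]
          rw [hpi]
          have hle : mpb cc (k' + 1) ≤ k' := by have := mpb_le cc (k' + 1); omega
          exact ih (mpb cc (k' + 1)) (by omega) f' (by omega)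
            (fun j a b => hg j a (by omega))

-- one automaton step computes NX
lemma chainStep_eq_NX (cc : List Char) (x : Char) :
    ∀ k, k < cc.length →
      (if cc.getD (chainFind cc x k) ' ' = x then chainFind cc x k + 1 else chainFind cc x k)
        = NX cc k x := by
  intro k
  induction k using Nat.strong_induction_on with
  | _ k ih =>
    intro hk
    cases k with
    | zero =>
      have hcf : chainFind cc x 0 = 0 := by simp [chainFind]
      rw [hcf]
      unfold NX
      rw [Nat.findGreatest_succ]
      by_cases hx : cc.getD 0 ' ' = x
      · rw [if_pos hx, if_pos ⟨by omega, by exact List.nil_suffix, hx⟩]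
      · rw [if_neg hx, if_neg (by rintro ⟨-, -, h⟩; exact hx h)]
        rfl
    | succ k' =>
      rw [chainFind]
      by_cases hx : cc.getD (k' + 1) ' ' = x
      · rw [if_pos hx, if_pos hx]
        unfold NX
        refine (Nat.findGreatest_eq_iff.mpr ⟨le_rfl, fun _ => ⟨by omega, ?_, hx⟩,
          fun n h1 h2 => by omega⟩).symm
        exact List.suffix_refl _
      · rw [if_neg hx]
        have hle : mpb cc (k' + 1) ≤ k' := by have := mpb_le cc (k' + 1); omega
        rw [ih (mpb cc (k' + 1)) (by omega) (by omega)]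
        unfold NX
        refine (fg_congr (by omega) ?_ ?_).symm
        · rintro m hm0 hmb ⟨-, hsfx, hchar⟩
          have hm1 : m - 1 ≤ k' + 1 := sfx_le (by omega) hsfx
          have hne : m - 1 ≠ k' + 1 := by
            intro he; rw [he] at hchar; exact hx hchar
          have hch := (chain_iff (by omega) (by omega) (by omega)).mp hsfx
          have := sfx_le (cc := cc) (by omega : m - 1 ≤ cc.length) hch
          exact ⟨by omega, by omega, hch, hchar⟩
        · rintro m hm0 hmb ⟨-, hsfx, hchar⟩
          refine ⟨by omega, ?_, hchar⟩
          exact (chain_iff (by omega) (by omega) (by omega : m - 1 < k' + 1)).mpr hsfx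

lemma altStep_eq_NX (cc : List Char) (pi : List Nat) (k : Nat) (x : Char)
    (hk : k < cc.length) (hg : Good cc pi k) :
    altStep cc pi k x = NX cc k x := by
  unfold altStep
  rw [altFall_eq_chainFind cc pi x k k le_rfl hg]
  exact chainStep_eq_NX cc x k hk

-- the prefix-function recurrence
lemma mpb_rec (cc : List Char) (i : Nat) (h1 : 1 ≤ i) (hi : i < cc.length) :
    mpb cc (i + 1) = NX cc (mpb cc i) (cc.getD i ' ') := by
  have hq := mpb_le cc i
  set q := mpb cc i with hqd
  unfold mpb NX
  simp only [Nat.add_sub_cancel]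
  refine fg_congr (by omega) ?_ ?_
  · intro m hm0 hmb hP
    obtain ⟨m', rfl⟩ : ∃ m', m = m' + 1 := ⟨m - 1, by omega⟩
    rw [List.take_succ_eq_append_getElem hi,
        List.take_succ_eq_append_getElem (by omega : m' < cc.length),
        sfx_append_singleton] at hP
    obtain ⟨hchar, hsfx⟩ := hP
    have hch := (chain_iff (by omega) (by omega) (by omega : m' < i)).mp hsfx
    have hle := sfx_le (cc := cc) (by omega : m' ≤ cc.length) hch
    refine ⟨by omega, by omega, by simpa using hch, ?_⟩
    simp only [Nat.add_sub_cancel]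
    rw [List.getD_eq_getElem _ _ (by omega : m' < cc.length),
        List.getD_eq_getElem _ _ hi]
    exact hchar
  · intro m hm0 hmb hQ
    obtain ⟨-, hsfx, hchar⟩ := hQ
    obtain ⟨m', rfl⟩ : ∃ m', m = m' + 1 := ⟨m - 1, by omega⟩
    simp only [Nat.add_sub_cancel] at hsfx hchar
    have hsfx' := (chain_iff (by omega) (by omega) (by omega : m' < i)).mpr hsfx
    rw [List.take_succ_eq_append_getElem hi,
        List.take_succ_eq_append_getElem (by omega : m' < cc.length),
        sfx_append_singleton]
    refine ⟨?_, hsfx'⟩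
    rw [List.getD_eq_getElem _ _ (by omega : m' < cc.length),
        List.getD_eq_getElem _ _ hi] at hchar
    exact hchar

-- the matcher-state recurrence
lemma ovv_step (cc done : List Char) (ch : Char) (hlen : done.length < cc.length) :
    ovv cc (done ++ [ch]) = NX cc (ovv cc done) ch := by
  have hq : ovv cc done ≤ done.length := ovv_le cc done
  have hsufq : cc.take (ovv cc done) <:+ done := ovv_suffix cc done
  set q := ovv cc done with hqd
  unfold ovv NX
  simp only [List.length_append, List.length_cons, List.length_nil]
  refine fg_congr (by omega) ?_ ?_
  · intro m hm0 hmb hP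
    obtain ⟨m', rfl⟩ : ∃ m', m = m' + 1 := ⟨m - 1, by omega⟩
    rw [List.take_succ_eq_append_getElem (by omega : m' < cc.length),
        sfx_append_singleton] at hP
    obtain ⟨hchar, hsfx⟩ := hP
    have hm'q : m' ≤ q := by
      rw [hqd]; unfold ovv; exact Nat.le_findGreatest (by omega) hsfx
    have hsq : cc.take m' <:+ cc.take q := by
      refine List.suffix_of_suffix_length_le hsfx hsufq ?_
      rw [take_len (by omega : m' ≤ cc.length), take_len (by omega : q ≤ cc.length)]
      exact hm'q
    refine ⟨by omega, by omega, by simpa using hsq, ?_⟩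
    simp only [Nat.add_sub_cancel]
    rw [List.getD_eq_getElem _ _ (by omega : m' < cc.length)]
    exact hchar
  · intro m hm0 hmb hQ
    obtain ⟨-, hsfx, hchar⟩ := hQ
    obtain ⟨m', rfl⟩ : ∃ m', m = m' + 1 := ⟨m - 1, by omega⟩
    simp only [Nat.add_sub_cancel] at hsfx hchar
    have hdn : cc.take m' <:+ done := hsfx.trans hsufq
    rw [List.take_succ_eq_append_getElem (by omega : m' < cc.length),
        sfx_append_singleton]
    refine ⟨?_, hdn⟩
    rw [List.getD_eq_getElem _ _ (by omega : m' < cc.length)] at hchar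
    exact hchar

lemma good_of_map (cc : List Char) (i b : Nat) (hb : b ≤ i) :
    Good cc ((List.range i).map fun j => mpb cc (j + 1)) b := by
  intro j hj1 hj2
  rw [List.getD_eq_getElem _ _ (by simp; omega)]
  simp only [List.getElem_map, List.getElem_range]
  congr 1
  omega

lemma piLoop_inv (cc : List Char) (n : Nat) (hn : n = cc.length) :
    ∀ i, 1 ≤ i → i ≤ n →
      altPiLoop cc n i ((List.range i).map fun j => mpb cc (j + 1)) (mpb cc i) =
        (List.range n).map fun j => mpb cc (j + 1) := by
  subst hn
  suffices H : ∀ fuel i, 1 ≤ i → i ≤ cc.length → cc.length - i = fuel →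
      altPiLoop cc cc.length i ((List.range i).map fun j => mpb cc (j + 1)) (mpb cc i) =
        (List.range cc.length).map fun j => mpb cc (j + 1) by
    intro i h1 h2; exact H _ i h1 h2 rfl
  intro fuel
  induction fuel with
  | zero =>
    intro i h1 h2 hf
    have : i = cc.length := by omega
    subst this
    rw [altPiLoop, if_neg (lt_irrefl _)]
  | succ f ih =>
    intro i h1 h2 hf
    have hlt : i < cc.length := by omega
    have hmle := mpb_le cc i
    rw [altPiLoop, if_pos hlt]
    have hstep : altStep cc ((List.range i).map fun j => mpb cc (j + 1)) (mpb cc i)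
        (cc.getD i ' ') = mpb cc (i + 1) := by
      rw [altStep_eq_NX cc ((List.range i).map fun j => mpb cc (j + 1)) (mpb cc i)
        (cc.getD i ' ') (by omega) (good_of_map cc i (mpb cc i) (by omega))]
      exact (mpb_rec cc i h1 hlt).symm
    dsimp only
    rw [hstep]
    have hap : (List.range i).map (fun j => mpb cc (j + 1)) ++ [mpb cc (i + 1)]
        = (List.range (i + 1)).map fun j => mpb cc (j + 1) := by
      rw [List.range_succ, List.map_append]
      simp
    rw [hap]
    exact ih (i + 1) (by omega) (by omega) (by omega)

lemma fold_inv (cc : List Char) (pi : List Nat) (hg : Good cc pi cc.length) :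
    ∀ (rest done : List Char), done.length + rest.length ≤ cc.length →
      rest.foldl (fun q ch => altStep cc pi q ch) (ovv cc done) = ovv cc (done ++ rest) := by
  intro rest
  induction rest with
  | nil => intro done h; simp
  | cons ch rest ih =>
    intro done h
    rw [List.foldl_cons]
    have hlen : done.length < cc.length := by
      rw [List.length_cons] at h; omega
    have hql : ovv cc done < cc.length := lt_of_le_of_lt (ovv_le cc done) hlen
    rw [altStep_eq_NX cc pi _ ch hql (fun j a b => hg j a (by omega)),
        ← ovv_step cc done ch hlen]
    have := ih (done ++ [ch]) (by simp at h ⊢; omega)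
    rw [this, List.append_assoc, List.singleton_append]

lemma mtch_iff (target c : String) (k : Nat) (hk : k ≤ c.toList.length) :
    target.toList.drop (target.toList.length - k) = c.toList.take k ↔ c.toList.take k <:+ target.toList := by
  rw [List.suffix_iff_eq_drop, take_len hk]
  exact eq_comm

lemma final_val (target c : String) (h0 : 0 < target.toList.length)
    (hlen : c.toList.length = target.toList.length) :
    ((if ovv c.toList target.toList = target.toList.length
        then mpb c.toList target.toList.length
        else ovv c.toList target.toList : Nat) : Int)
      = ((Nat.findGreatest (fun k => target.toList.drop (target.toList.length - k) = c.toList.take k) (target.toList.length - 1) : Nat) : Int) := by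
  obtain ⟨m, hm⟩ : ∃ m, target.toList.length = m + 1 := ⟨target.toList.length - 1, by omega⟩
  have hfg : Nat.findGreatest (fun k => c.toList.take k <:+ target.toList) m
      = Nat.findGreatest (fun k => target.toList.drop (target.toList.length - k) = c.toList.take k) m := by
    refine (fg_congr le_rfl ?_ ?_).symm
    · intro k hk0 hkb hP
      exact ⟨hkb, (mtch_iff target c k (by omega)).mp hP⟩
    · intro k hk0 hkb hQ
      exact (mtch_iff target c k (by omega)).mpr hQ
  have hv : ovv c.toList target.toList
      = if c.toList.take (m + 1) <:+ target.toList then m + 1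
        else Nat.findGreatest (fun k => c.toList.take k <:+ target.toList) m := by
    unfold ovv
    rw [hm, Nat.findGreatest_succ]
  by_cases hR : c.toList.take (m + 1) <:+ target.toList
  · have hql : m + 1 = c.toList.length := by omega
    have hcc : c.toList = target.toList := by
      have h1 : c.toList.take (m + 1) = c.toList := by rw [hql, List.take_length]
      rw [h1] at hR
      exact hR.eq_of_length (by omega)
    have hmpb : mpb c.toList (m + 1)
        = Nat.findGreatest (fun k => c.toList.take k <:+ target.toList) m := by
      unfold mpb
      simp only [Nat.add_sub_cancel]
      simp only [show c.toList.take (m + 1) = target.toList from by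
        rw [hql, List.take_length, hcc]]
    rw [hv, if_pos hR, hm, if_pos rfl, hmpb, hfg]
    simp only [hm, Nat.add_sub_cancel]
  · rw [hv, if_neg hR, hm]
    have hle : Nat.findGreatest (fun k => c.toList.take k <:+ target.toList) m ≤ m :=
      Nat.findGreatest_le m
    rw [if_neg (by omega), hfg]
    simp only [hm, Nat.add_sub_cancel]

-- per-candidate equality of the two overlap computations
lemma overlap_eq (target c : String) :
    findLargestOverlap target c = altOverlap target c := by
  unfold findLargestOverlap altOverlap
  dsimp only
  by_cases hg : target.toList.length = 0 ∨ c.toList.length ≠ target.toList.length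
  · have hA : strandsAreNotEmpty target c = false ∨ strandsAreEqualLengths target c = false := by
      unfold strandsAreNotEmpty strandsAreEqualLengths
      rcases hg with h | h
      · left
        rw [if_neg (show ¬(PySem.Str.len target > 0 ∧ PySem.Str.len c > 0) by
          simp only [PySem.Str.len_eq]; omega)]
      · by_cases he : PySem.Str.len target = PySem.Str.len c
        · left
          rw [if_neg (show ¬(PySem.Str.len target > 0 ∧ PySem.Str.len c > 0) by
            simp only [PySem.Str.len_eq] at he ⊢; omega)]
        · right
          rw [if_neg he]
    rw [if_pos hA, if_pos hg]
  · have hA : ¬(strandsAreNotEmpty target c = false ∨ strandsAreEqualLengths target c = false) := by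
      unfold strandsAreNotEmpty strandsAreEqualLengths
      rw [if_pos (show (PySem.Str.len target > 0 ∧ PySem.Str.len c > 0) by
            simp only [PySem.Str.len_eq]; omega),
          if_pos (show PySem.Str.len target = PySem.Str.len c by
            simp only [PySem.Str.len_eq]; omega)]
      simp
    have h0 : target.toList.length ≠ 0 := fun h => hg (Or.inl h)
    have hlen : c.toList.length = target.toList.length := by
      by_contra h; exact hg (Or.inr h)
    rw [if_neg hA, if_neg hg,
        show (1 : Int) = ((1 : Nat) : Int) from rfl,
        flowLoop_eq_dscan target c 1 0 le_rfl (by omega), dscan_eq_fg]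
    -- B side
    have hpi := piLoop_inv c.toList target.toList.length hlen.symm 1 le_rfl (by omega)
    have h1 : (List.range 1).map (fun j => mpb c.toList (j + 1)) = [0] := by
      simp [List.range_one, mpb]
    have h2 : mpb c.toList 1 = 0 := by simp [mpb]
    rw [h1, h2] at hpi
    rw [hpi]
    have hfold := fold_inv c.toList ((List.range target.toList.length).map fun j => mpb c.toList (j + 1))
      (good_of_map c.toList target.toList.length c.toList.length (by omega))
      target.toList [] (by simp only [List.length_nil]; omega)
    rw [List.nil_append] at hfold
    rw [show ovv c.toList ([] : List Char) = 0 from rfl] at hfold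
    rw [hfold]
    have hgetD : ((List.range target.toList.length).map fun j => mpb c.toList (j + 1)).getD
        (target.toList.length - 1) 0 = mpb c.toList target.toList.length := by
      rw [List.getD_eq_getElem _ _
        (by rw [List.length_map, List.length_range]; omega)]
      simp only [List.getElem_map, List.getElem_range]
      congr 1
      omega
    rw [hgetD]
    exact (final_val target c (by omega) hlen).symm

-- ===== VERDICT (by name: the statement is the Claim_ definition above) =====
theorem findBestCandidate_spec : Claim_equal_findBestCandidate := by
  intro target candidates _
  unfold Spec_findBestCandidate findBestCandidate findBestCandidate_alt
  have hf : (fun (st : String × Int) line =>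
        if findLargestOverlap target line > st.2 then (line, findLargestOverlap target line) else st)
      = (fun (st : String × Int) line =>
        let v := altOverlap target line
        if v > st.2 then (line, v) else st) := by
    funext st line
    simp only [overlap_eq]
  rw [hf]
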